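-- pv_equiv track=rewrite | github.com/developer388/Pattern-wise-coding-problems | 01 Sliding Window/question06.py | bruteForceSolution
-- ===== SOURCE A (Python) =====
-- def bruteForceSolution(arr, k):
--
--     result = 0
--
--     for i in range(len(arr)):
--
--         word = ''
--         map = {}
--
--         for j in range(i, len(arr)):
--
--             word += arr[j]
--
--             if arr[j] not in map:
--                 map[arr[j]] = 1
--             else:
--                 map[arr[j]] += 1
--
--             if len(map) == 2 and 2 in map.values():
--                 result = max(result, len(word))
--
--
--     return result
-- ===== SOURCE B (Python) =====
-- def _scan(a, rest, best):
--     # longest-window scan starting at a fixed element: track the (at most) two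
--     # distinct values of the window explicitly; stop at the third distinct value
--     ca = 1
--     b = None
--     cb = 0
--     total = len(a)
--     for w in rest:
--         if w == a:
--             ca += 1
--         elif b is None:
--             b = w
--             cb = 1
--         elif w == b:
--             cb += 1
--         else:
--             break
--         total += len(w)
--         if b is not None and (ca == 2 or cb == 2) and total > best:
--             best = total
--     return best
--
--
-- def bruteForceSolution(arr, k):
--     best = 0
--     suffix = arr
--     while suffix:
--         best = _scan(suffix[0], suffix[1:], best)
--         suffix = suffix[1:]
--     return best
-- ===== Notes on version B (the rewrite author's own statement) =====
-- stated objective: faster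
-- what changed: A rescans every window from every start, concatenating a growing string and keeping a dict per window; B scans each start once tracking the window's at-most-two distinct values and their counts explicitly (no dict, no string building), keeps a running character total, and breaks as soon as a third distinct value enters the window.
import Mathlib
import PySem

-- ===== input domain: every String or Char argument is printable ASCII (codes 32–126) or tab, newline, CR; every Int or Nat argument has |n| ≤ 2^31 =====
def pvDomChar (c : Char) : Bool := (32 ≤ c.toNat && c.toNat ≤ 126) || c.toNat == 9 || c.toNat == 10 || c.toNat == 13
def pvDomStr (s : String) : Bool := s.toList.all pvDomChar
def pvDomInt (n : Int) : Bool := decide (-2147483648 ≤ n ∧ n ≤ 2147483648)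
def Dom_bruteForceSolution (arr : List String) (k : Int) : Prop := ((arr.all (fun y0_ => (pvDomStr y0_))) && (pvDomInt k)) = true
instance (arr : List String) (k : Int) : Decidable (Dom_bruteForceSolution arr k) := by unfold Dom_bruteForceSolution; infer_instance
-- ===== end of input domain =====

-- B replaces A's all-windows rescan (string concatenation + dict per window) by a per-start scan
-- that tracks the window's at-most-two distinct values explicitly and stops at the third distinct
-- value (objective: faster; measured on the timing inputs).

-- ===== PORT A =====
-- the body of A's inner 'for j' loop, one step (the state is (word, map, result))
def pvAStep (st : String × PySem.Dict String Int × Int) (w : String) :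
    String × PySem.Dict String Int × Int :=
  let word := st.1 ++ w
  let map := if st.2.1.contains w = false then st.2.1.insert w 1
             else st.2.1.modify w 0 (· + 1)
  let result := if map.size == 2 && map.values.contains 2
                then max st.2.2 (PySem.Str.len word) else st.2.2
  (word, map, result)

def bruteForceSolution (arr : List String) (k : Int) : Int :=
  (PySem.List.pyRange 0 (PySem.List.len arr)).foldl
    (fun result i =>
      ((PySem.List.pyRange i (PySem.List.len arr)).foldl
        (fun st j => pvAStep st (PySem.List.pyGetD arr j ""))
        ("", PySem.Dict.empty, result)).2.2)
    0

-- ===== PORT B =====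
-- Source B's _scan: walk the rest of the suffix keeping (a, ca) and (b, cb); break on a third value
def pvScan : List String → String → Int → Option String → Int → Int → Int → Int
  | [], _, _, _, _, _, best => best
  | w :: rest, a, ca, b, cb, total, best =>
    if w == a then
      let ca := ca + 1
      let total := total + PySem.Str.len w
      let best := if b.isSome && (ca == 2 || cb == 2) && decide (best < total) then total else best
      pvScan rest a ca b cb total best
    else
      match b with
      | none =>
        let b := some w
        let cb : Int := 1
        let total := total + PySem.Str.len w
        let best := if b.isSome && (ca == 2 || cb == 2) && decide (best < total) then total else best
        pvScan rest a ca b cb total best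
      | some bv =>
        if w == bv then
          let cb := cb + 1
          let total := total + PySem.Str.len w
          let best := if (some bv).isSome && (ca == 2 || cb == 2) && decide (best < total) then total else best
          pvScan rest a ca (some bv) cb total best
        else best

-- Source B's while loop over the successive suffixes of arr
def pvOuter : List String → Int → Int
  | [], best => best
  | x :: xs, best => pvOuter xs (pvScan xs x 1 none 0 (PySem.Str.len x) best)

def bruteForceSolution_alt (arr : List String) (k : Int) : Int :=
  pvOuter arr 0

-- ===== PRECONDITION & SPEC =====
def Spec_bruteForceSolution (arr : List String) (k : Int) (out : Int) : Prop := out = bruteForceSolution_alt arr k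
instance (arr : List String) (k : Int) (out : Int) : Decidable (Spec_bruteForceSolution arr k out) := by unfold Spec_bruteForceSolution; infer_instance

-- ===== CLAIM (what is proved, stated in full; the proofs are below) =====
def Claim_equal_bruteForceSolution : Prop := ∀ (arr : List String) (k : Int), Dom_bruteForceSolution arr k → Spec_bruteForceSolution arr k (bruteForceSolution arr k)

-- ===== LEMMAS AND PROOFS =====

theorem pv_int_beq_comm (a b : Int) : (a == b) = (b == a) := by
  by_cases h : a = b
  · simp [h]
  · simp [h, Ne.symm h]

theorem pv_max_eq (r t : Int) : max r t = if decide (r < t) then t else r := by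
  by_cases h : r < t
  · rw [if_pos (by simpa using h)]
    exact max_eq_right (le_of_lt h)
  · rw [if_neg (by simpa using h)]
    exact max_eq_left (by omega)

-- A updates result with 'max', B with a guarded assignment: same function
theorem pv_if_max (X : Bool) (r t : Int) :
    (if (X && decide (r < t)) = true then t else r) = (if X = true then max r t else r) := by
  cases X
  · simp
  · simp [pv_max_eq]

theorem pv_size_keys (d : PySem.Dict String Int) : d.size = d.keys.length := by
  simp [PySem.Dict.size, PySem.Dict.keys]

-- one step of A's inner loop on a dict that already has ≥ 3 keys keeps ≥ 3 keys and result
theorem pv_dead_step (word : String) (d : PySem.Dict String Int) (r : Int) (w : String) (h : 3 ≤ d.size) :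
    ∃ d', pvAStep (word, d, r) w = (word ++ w, d', r) ∧ 3 ≤ d'.size := by
  by_cases hc : d.contains w = true
  · have hs : (d.modify w 0 (· + 1)).size = d.size := by
      rw [pv_size_keys, pv_size_keys, PySem.Dict.keys_modify, PySem.Dict.keys_insert_of_contains _ _ hc]
    have h3 : 3 ≤ (d.modify w 0 (· + 1)).size := by omega
    refine ⟨d.modify w 0 (· + 1), ?_, h3⟩
    have hne : ((d.modify w 0 (· + 1)).size == 2) = false := by
      simp; omega
    simp only [pvAStep, hc, hne]
    simp [hc, hne]
  · have hc' : d.contains w = false := by simpa using hc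
    have hs : (d.insert w 1).size = d.size + 1 := by
      rw [PySem.Dict.size_insert, if_neg (by simp [hc'])]
    have h3 : 3 ≤ (d.insert w 1).size := by omega
    refine ⟨d.insert w 1, ?_, h3⟩
    have hne : ((d.insert w 1).size == 2) = false := by
      simp; omega
    simp only [pvAStep, hc', hne]
    simp [hc', hne]

-- once the dict has ≥ 3 keys, A's inner loop can never change result again
theorem pv_dead (l : List String) : ∀ (word : String) (d : PySem.Dict String Int) (r : Int),
    3 ≤ d.size → (l.foldl pvAStep (word, d, r)).2.2 = r := by
  induction l with
  | nil => intro word d r _; rfl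
  | cons w t ih =>
    intro word d r h
    obtain ⟨d', hstep, h3⟩ := pv_dead_step word d r w h
    simp only [List.foldl_cons, hstep]
    exact ih _ d' r h3

-- '2 in map.values()' on A's two-key dict
theorem pv_contains2_eq (a b : String) (ca cb : Int) :
    ((PySem.Dict.mk [(a, ca), (b, cb)]).values.contains 2) = ((ca == 2) || (cb == 2)) := by
  show ([ca, cb].contains 2) = _
  rw [List.contains_cons, List.contains_cons, List.contains_nil, Bool.or_false,
    pv_int_beq_comm 2 ca, pv_int_beq_comm 2 cb]

-- the four shapes of one step of B's scan loop
theorem pv_scan_cons_a (w : String) (t : List String) (a : String) (ca : Int) (b : Option String)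
    (cb total best : Int) (h : (w == a) = true) :
    pvScan (w :: t) a ca b cb total best =
      pvScan t a (ca + 1) b cb (total + PySem.Str.len w)
        (if (b.isSome && (ca + 1 == 2 || cb == 2) && decide (best < total + PySem.Str.len w)) = true
         then total + PySem.Str.len w else best) := by
  simp [pvScan, h]

theorem pv_scan_cons_b (w : String) (t : List String) (a : String) (ca : Int) (bv : String)
    (cb total best : Int) (h : (w == a) = false) (h2 : (w == bv) = true) :
    pvScan (w :: t) a ca (some bv) cb total best =
      pvScan t a ca (some bv) (cb + 1) (total + PySem.Str.len w)
        (if (((some bv).isSome && (ca == 2 || cb + 1 == 2)) && decide (best < total + PySem.Str.len w)) = true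
         then total + PySem.Str.len w else best) := by
  simp [pvScan, h, h2]

theorem pv_scan_cons_new (w : String) (t : List String) (a : String) (ca : Int)
    (total best : Int) (h : (w == a) = false) :
    pvScan (w :: t) a ca none 0 total best =
      pvScan t a ca (some w) 1 (total + PySem.Str.len w)
        (if (((some w).isSome && (ca == 2 || (1 : Int) == 2)) && decide (best < total + PySem.Str.len w)) = true
         then total + PySem.Str.len w else best) := by
  simp [pvScan, h]

theorem pv_scan_cons_break (w : String) (t : List String) (a : String) (ca : Int) (bv : String)
    (cb total best : Int) (h : (w == a) = false) (h2 : (w == bv) = false) :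
    pvScan (w :: t) a ca (some bv) cb total best = best := by
  simp [pvScan, h, h2]

-- the shapes of one step of A's inner loop on a one-key / two-key / empty dict
theorem pv_astep_two_a (word a b : String) (ca cb r : Int) (hba : ¬ b = a) :
    pvAStep (word, PySem.Dict.mk [(a, ca), (b, cb)], r) a =
      (word ++ a, PySem.Dict.mk [(a, ca + 1), (b, cb)],
        if ((ca + 1 == 2) || (cb == 2)) = true then max r (PySem.Str.len (word ++ a)) else r) := by
  have hc : (PySem.Dict.mk [(a, ca), (b, cb)]).contains a = true := by
    simp [PySem.Dict.contains]
  have hm : (PySem.Dict.mk [(a, ca), (b, cb)]).modify a 0 (· + 1) =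
      PySem.Dict.mk [(a, ca + 1), (b, cb)] := by
    simp [PySem.Dict.modify, PySem.Dict.insert, PySem.Dict.getD, PySem.Dict.get?,
      beq_iff_eq, hba]
  simp only [pvAStep, hc, hm]
  simp [hc, hm, pv_contains2_eq, PySem.Dict.size]
  exact if_congr (by omega) rfl rfl

theorem pv_astep_two_b (word a b : String) (ca cb r : Int) (hab : ¬ a = b) :
    pvAStep (word, PySem.Dict.mk [(a, ca), (b, cb)], r) b =
      (word ++ b, PySem.Dict.mk [(a, ca), (b, cb + 1)],
        if ((ca == 2) || (cb + 1 == 2)) = true then max r (PySem.Str.len (word ++ b)) else r) := by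
  have hc : (PySem.Dict.mk [(a, ca), (b, cb)]).contains b = true := by
    simp [PySem.Dict.contains]
  have hm : (PySem.Dict.mk [(a, ca), (b, cb)]).modify b 0 (· + 1) =
      PySem.Dict.mk [(a, ca), (b, cb + 1)] := by
    simp [PySem.Dict.modify, PySem.Dict.insert, PySem.Dict.getD, PySem.Dict.get?,
      beq_iff_eq, hab, Ne.symm hab]
  simp only [pvAStep, hc, hm]
  simp [hc, hm, pv_contains2_eq, PySem.Dict.size]
  exact if_congr (by omega) rfl rfl

theorem pv_astep_two_new (word a b w : String) (ca cb r : Int)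
    (hwa : ¬ w = a) (hwb : ¬ w = b) :
    pvAStep (word, PySem.Dict.mk [(a, ca), (b, cb)], r) w =
      (word ++ w, PySem.Dict.mk [(a, ca), (b, cb), (w, 1)], r) := by
  have hc : (PySem.Dict.mk [(a, ca), (b, cb)]).contains w = false := by
    simp [PySem.Dict.contains, beq_iff_eq, Ne.symm hwa, Ne.symm hwb]
  have hi : (PySem.Dict.mk [(a, ca), (b, cb)]).insert w 1 =
      PySem.Dict.mk [(a, ca), (b, cb), (w, 1)] := by
    simp [PySem.Dict.insert, beq_iff_eq, Ne.symm hwa, Ne.symm hwb]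
  simp only [pvAStep, hc, hi]
  simp [hc, hi, PySem.Dict.size]

theorem pv_astep_one_a (word a : String) (ca r : Int) :
    pvAStep (word, PySem.Dict.mk [(a, ca)], r) a =
      (word ++ a, PySem.Dict.mk [(a, ca + 1)], r) := by
  have hc : (PySem.Dict.mk [(a, ca)]).contains a = true := by
    simp [PySem.Dict.contains]
  have hm : (PySem.Dict.mk [(a, ca)]).modify a 0 (· + 1) = PySem.Dict.mk [(a, ca + 1)] := by
    simp [PySem.Dict.modify, PySem.Dict.insert, PySem.Dict.getD, PySem.Dict.get?]
  simp only [pvAStep, hc, hm]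
  simp [hc, hm, PySem.Dict.size]

theorem pv_astep_one_new (word a w : String) (ca r : Int) (hwa : ¬ w = a) :
    pvAStep (word, PySem.Dict.mk [(a, ca)], r) w =
      (word ++ w, PySem.Dict.mk [(a, ca), (w, 1)],
        if ((ca == 2) || ((1 : Int) == 2)) = true then max r (PySem.Str.len (word ++ w)) else r) := by
  have hc : (PySem.Dict.mk [(a, ca)]).contains w = false := by
    simp [PySem.Dict.contains, beq_iff_eq, Ne.symm hwa]
  have hi : (PySem.Dict.mk [(a, ca)]).insert w 1 = PySem.Dict.mk [(a, ca), (w, 1)] := by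
    simp [PySem.Dict.insert, beq_iff_eq, Ne.symm hwa]
  simp only [pvAStep, hc, hi]
  simp [hc, hi, pv_contains2_eq, PySem.Dict.size]
  exact if_congr (by omega) rfl rfl

theorem pv_astep_empty (word w : String) (r : Int) :
    pvAStep (word, PySem.Dict.empty, r) w =
      (word ++ w, PySem.Dict.mk [(w, 1)], r) := by
  have hc : (PySem.Dict.empty : PySem.Dict String Int).contains w = false := by
    simp [PySem.Dict.contains, PySem.Dict.empty]
  have hi : (PySem.Dict.empty : PySem.Dict String Int).insert w 1 = PySem.Dict.mk [(w, 1)] := by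
    simp [PySem.Dict.insert, PySem.Dict.empty]
  simp only [pvAStep, hc, hi]
  simp [hc, hi, PySem.Dict.size]

-- two-distinct phase: A's dict is [(a,ca),(b,cb)] and the two loops agree step for step
theorem pv_two (l : List String) : ∀ (a b : String) (ca cb : Int) (word : String) (total r : Int),
    ¬ b = a → PySem.Str.len word = total →
    (l.foldl pvAStep (word, PySem.Dict.mk [(a, ca), (b, cb)], r)).2.2 =
      pvScan l a ca (some b) cb total r := by
  induction l with
  | nil => intro a b ca cb word total r _ _; rfl
  | cons w t ih =>
    intro a b ca cb word total r hba hlen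
    by_cases hwa : w = a
    · subst hwa
      rw [List.foldl_cons, pv_astep_two_a word w b ca cb r hba,
        ih w b (ca + 1) cb (word ++ w) (total + PySem.Str.len w) _ hba
          (by rw [PySem.Str.len_append, hlen]),
        pv_scan_cons_a w t w (ca) (some b) cb total r (by simp)]
      congr 1
      rw [PySem.Str.len_append, hlen]
      simp only [Option.isSome_some, Bool.true_and]
      rw [pv_if_max]
    · by_cases hwb : w = b
      · subst hwb
        rw [List.foldl_cons, pv_astep_two_b word a w ca cb r (Ne.symm hwa),
          ih a w ca (cb + 1) (word ++ w) (total + PySem.Str.len w) _ hwa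
            (by rw [PySem.Str.len_append, hlen]),
          pv_scan_cons_b w t a ca w cb total r (by simp [hwa]) (by simp)]
        congr 1
        rw [PySem.Str.len_append, hlen]
        simp only [Option.isSome_some, Bool.true_and]
        rw [pv_if_max]
      · rw [List.foldl_cons, pv_astep_two_new word a b w ca cb r hwa hwb,
          pv_dead t _ _ r (by simp [PySem.Dict.size]),
          pv_scan_cons_break w t a ca b cb total r (by simp [hwa]) (by simp [hwb])]

-- one-distinct phase
theorem pv_one (l : List String) : ∀ (a : String) (ca : Int) (word : String) (total r : Int),
    PySem.Str.len word = total →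
    (l.foldl pvAStep (word, PySem.Dict.mk [(a, ca)], r)).2.2 =
      pvScan l a ca none 0 total r := by
  induction l with
  | nil => intro a ca word total r _; rfl
  | cons w t ih =>
    intro a ca word total r hlen
    by_cases hwa : w = a
    · subst hwa
      rw [List.foldl_cons, pv_astep_one_a word w ca r,
        ih w (ca + 1) (word ++ w) (total + PySem.Str.len w) r
          (by rw [PySem.Str.len_append, hlen]),
        pv_scan_cons_a w t w ca none 0 total r (by simp)]
      simp
    · rw [List.foldl_cons, pv_astep_one_new word a w ca r hwa,
        pv_two t a w ca 1 (word ++ w) (total + PySem.Str.len w) _ hwa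
          (by rw [PySem.Str.len_append, hlen]),
        pv_scan_cons_new w t a ca total r (by simp [hwa])]
      congr 1
      rw [PySem.Str.len_append, hlen]
      simp only [Option.isSome_some, Bool.true_and]
      rw [pv_if_max]

-- A's inner loop, as a function of the window suffix
def pvInner (l : List String) (r : Int) : Int :=
  (l.foldl pvAStep ("", PySem.Dict.empty, r)).2.2

theorem pv_inner_cons (x : String) (xs : List String) (r : Int) :
    pvInner (x :: xs) r = pvScan xs x 1 none 0 (PySem.Str.len x) r := by
  unfold pvInner
  rw [List.foldl_cons, pv_astep_empty "" x r,
    pv_one xs x 1 ("" ++ x) (PySem.Str.len x) r (by simp [PySem.Str.len_append])]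

theorem pv_outer_eq (xs : List String) : ∀ r : Int,
    (List.range xs.length).foldl (fun r k => pvInner (xs.drop k) r) r = pvOuter xs r := by
  induction xs with
  | nil => intro r; rfl
  | cons x t ih =>
    intro r
    rw [List.length_cons, List.range_succ_eq_map, List.foldl_cons, List.foldl_map]
    simp only [List.drop_zero, Nat.succ_eq_add_one, List.drop_succ_cons]
    rw [ih (pvInner (x :: t) r), pv_inner_cons]
    rfl

theorem pv_main (arr : List String) (k : Int) :
    bruteForceSolution arr k = bruteForceSolution_alt arr k := by
  unfold bruteForceSolution bruteForceSolution_alt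
  rw [PySem.List.pyRange_one 0 (PySem.List.len arr), List.foldl_map]
  have hn : ((PySem.List.len arr) - 0).toNat = arr.length := by simp
  rw [hn]
  rw [PySem.List.foldl_congr_mem _ _ (fun r kk => pvInner (arr.drop kk) r) 0 ?_]
  · rw [pv_outer_eq]
  · intro acc kk hk
    show ((PySem.List.pyRange (0 + (kk : Int)) (PySem.List.len arr)).foldl
      (fun st j => pvAStep st (PySem.List.pyGetD arr j "")) ("", PySem.Dict.empty, acc)).2.2 = _
    rw [zero_add]
    rw [PySem.List.foldl_pyRange_pyGetD arr "" pvAStep ("", PySem.Dict.empty, acc)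
      (by positivity : (0 : Int) ≤ (kk : Int))]
    simp only [Int.toNat_natCast]
    rfl

-- ===== VERDICT (by name: the statement is the Claim_ definition above) =====
theorem bruteForceSolution_spec : Claim_equal_bruteForceSolution := by
  intro arr k _
  unfold Spec_bruteForceSolution
  exact pv_main arr k
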